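-- pv_equiv track=rewrite | github.com/FarzanRahmani/IntroductionToBioinformatics | HWs/HW1/4.py | calculate_max_gaps
-- ===== SOURCE A (Python) =====
-- def calculate_max_gaps(seq1, seq2):
--     '''
--         Function to calculate the maximum number of gap symbols in an optimal alignment
--     '''
--     len_seq1 = len(seq1)
--     len_seq2 = len(seq2)
--
--     # Initialize the alignment matrix with zero values
--     alignment_matrix = [[0] * (len_seq1 + 1) for _ in range(len_seq2 + 1)] # Using a 2D list (array) of size (m+1) x (n+1) for dynamic programming table
--
--     # Fill the alignment matrix based on LCS matching rules
--     for j in range(1, len_seq2 + 1): # Iterate over each character of seq2 (outer loop)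
--         for i in range(1, len_seq1 + 1): # Iterate over each character of seq1 (inner loop)
--             if seq1[i - 1] == seq2[j - 1]:
--                 # If characters match, increment the value from the diagonal cell
--                 alignment_matrix[j][i] = alignment_matrix[j - 1][i - 1] + 1
--             else:
--                 # If characters do not match, take the maximum from the left or top cell
--                 alignment_matrix[j][i] = max(alignment_matrix[j][i - 1], alignment_matrix[j - 1][i])
--
--     # The length of the Longest Common Subsequence (LCS) is found at the bottom-right cell
--     lcs_length = alignment_matrix[len_seq2][len_seq1]
--
--     # Calculate the maximum number of gaps in the optimal alignment
--     # Total gaps = (length of seq1 + length of seq2) - 2 * LCS length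
--     max_gaps = (len_seq1 + len_seq2) - 2 * lcs_length
--
--     return max_gaps
-- ===== SOURCE B (Python) =====
-- def calculate_max_gaps(seq1, seq2):
--     '''Top-down, demand-driven LCS: the recursion lcs(i, j) on prefix lengths is
--     evaluated by an explicit stack machine (defunctionalized continuations) with
--     a memo table, instead of filling a bottom-up DP matrix.'''
--     memo = {}
--
--     def lcs(i0, j0):
--         stack = [("eval", i0, j0)]
--         vals = []
--         while stack:
--             frame = stack.pop()
--             op, i, j = frame
--             if op == "eval":
--                 if (i, j) in memo:
--                     vals.append(memo[(i, j)])
--                 elif i == 0 or j == 0: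
--                     vals.append(0)
--                 elif seq1[i - 1] == seq2[j - 1]:
--                     stack.append(("add1", i, j))
--                     stack.append(("eval", i - 1, j - 1))
--                 else:
--                     stack.append(("max", i, j))
--                     stack.append(("eval", i - 1, j))
--                     stack.append(("eval", i, j - 1))
--             elif op == "add1":
--                 v = vals.pop() + 1
--                 memo[(i, j)] = v
--                 vals.append(v)
--             else:  # "max"
--                 a = vals.pop()
--                 b = vals.pop()
--                 v = a if a > b else b
--                 memo[(i, j)] = v
--                 vals.append(v)
--         return vals[-1]
--
--     return len(seq1) + len(seq2) - 2 * lcs(len(seq1), len(seq2))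
-- ===== Notes on version B (the rewrite author's own statement) =====
-- stated objective: alternative
-- what changed: Replaces A's bottom-up (m+1)x(n+1) DP matrix filled by nested index loops with a demand-driven top-down evaluation of the LCS recursion: an explicit stack machine with defunctionalized continuation frames ('eval'/'add1'/'max') and a memo dict, computing only the subproblems the recursion actually reaches.
import Mathlib
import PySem

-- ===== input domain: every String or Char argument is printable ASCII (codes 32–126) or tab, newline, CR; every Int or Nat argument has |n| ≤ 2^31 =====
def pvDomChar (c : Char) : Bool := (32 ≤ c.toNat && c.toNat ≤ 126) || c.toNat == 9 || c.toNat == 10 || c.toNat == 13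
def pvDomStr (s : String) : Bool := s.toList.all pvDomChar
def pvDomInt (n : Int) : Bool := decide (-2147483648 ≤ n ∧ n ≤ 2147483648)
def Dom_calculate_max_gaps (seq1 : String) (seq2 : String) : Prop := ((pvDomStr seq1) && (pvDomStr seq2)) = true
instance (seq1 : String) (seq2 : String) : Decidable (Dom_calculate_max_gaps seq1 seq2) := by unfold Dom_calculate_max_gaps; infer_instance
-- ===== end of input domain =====

-- B replaces A's bottom-up DP matrix by a demand-driven stack machine (explicit
-- continuation frames + memo table) evaluating the top-down LCS recursion
-- (objective: alternative).

-- ===== PORT A =====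
-- A is total; all matrix/string indices are provably in range, so the total
-- forms pyGetD/pySetD are exact here (no Python exception is reachable).
-- inner-loop body: one assignment alignment_matrix[j][i] = …
def aBody (s1 s2 : List Char) (j : Int) (M : List (List Int)) (i : Int) : List (List Int) :=
  let v : Int :=
    if PySem.List.pyGetD s1 (i - 1) 'a' = PySem.List.pyGetD s2 (j - 1) 'a' then
      PySem.List.pyGetD (PySem.List.pyGetD M (j - 1) []) (i - 1) 0 + 1
    else
      max (PySem.List.pyGetD (PySem.List.pyGetD M j []) (i - 1) 0)
          (PySem.List.pyGetD (PySem.List.pyGetD M (j - 1) []) i 0)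
  PySem.List.pySetD M j (PySem.List.pySetD (PySem.List.pyGetD M j []) i v)

def calculate_max_gaps (seq1 : String) (seq2 : String) : Int :=
  let s1 := seq1.toList
  let s2 := seq2.toList
  let len_seq1 : Int := (s1.length : Int)
  let len_seq2 : Int := (s2.length : Int)
  let alignment_matrix : List (List Int) :=
    (PySem.List.pyRange 0 (len_seq2 + 1) 1).map (fun _ => List.replicate (len_seq1 + 1).toNat (0 : Int))
  let alignment_matrix :=
    (PySem.List.pyRange 1 (len_seq2 + 1) 1).foldl (fun M j =>
      (PySem.List.pyRange 1 (len_seq1 + 1) 1).foldl (aBody s1 s2 j) M) alignment_matrix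
  let lcs_length := PySem.List.pyGetD (PySem.List.pyGetD alignment_matrix len_seq2 []) len_seq1 0
  (len_seq1 + len_seq2) - 2 * lcs_length

-- ===== PORT B =====
-- stack frames of Source B's machine: ("eval", i, j), ("add1", i, j), ("max", i, j).
-- The machine's indices are always ≥ 0 (they start at the lengths and are only
-- decremented behind the i==0/j==0 guard), so Nat indices are exact.
inductive PvFrame where
  | ev (i j : Nat)
  | add1 (i j : Nat)
  | mx (i j : Nat)
deriving DecidableEq, Repr

-- termination measure for the while-loop (not part of Source B's data)
def pvFrameW : PvFrame → Nat
  | .ev i j => 3 ^ (i + j + 2)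
  | _ => 1

-- the while-loop of Source B's lcs: one clause per frame kind, same branch order.
-- seq[i-1] with 1 ≤ i ≤ len is in range and vals.pop() always sees a non-empty
-- vals at reachable states, so the total forms getD/getLastD/dropLast are exact.
def pvMachine (s1 s2 : List Char) : List PvFrame → List Int → PySem.Dict (Nat × Nat) Int → List Int
  | [], vals, _ => vals
  | (.ev i j) :: stack, vals, memo =>
    match memo.get? (i, j) with
    | some v => pvMachine s1 s2 stack (vals ++ [v]) memo
    | none =>
      if i = 0 ∨ j = 0 then
        pvMachine s1 s2 stack (vals ++ [0]) memo
      else if s1.getD (i - 1) 'a' = s2.getD (j - 1) 'a' then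
        pvMachine s1 s2 (.ev (i - 1) (j - 1) :: .add1 i j :: stack) vals memo
      else
        pvMachine s1 s2 (.ev i (j - 1) :: .ev (i - 1) j :: .mx i j :: stack) vals memo
  | (.add1 i j) :: stack, vals, memo =>
    let v := vals.getLastD 0 + 1
    pvMachine s1 s2 stack (vals.dropLast ++ [v]) (memo.insert (i, j) v)
  | (.mx i j) :: stack, vals, memo =>
    let a := vals.getLastD 0
    let b := vals.dropLast.getLastD 0
    let v := if a > b then a else b
    pvMachine s1 s2 stack (vals.dropLast.dropLast ++ [v]) (memo.insert (i, j) v)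
termination_by stack _ _ => (stack.map pvFrameW).sum
decreasing_by
  · simp [pvFrameW]
  · simp [pvFrameW]
  · rename_i hij _
    simp only [List.map_cons, List.sum_cons, pvFrameW]
    have h1 : ¬(i = 0) ∧ ¬(j = 0) := by tauto
    have he : i - 1 + (j - 1) + 2 = i + j := by omega
    rw [he]
    have hp : 3 ^ (i + j) * 9 = 3 ^ (i + j + 2) := by ring
    have h2 : 1 ≤ 3 ^ (i + j) := Nat.one_le_pow _ _ (by norm_num)
    omega
  · rename_i hij _
    simp only [List.map_cons, List.sum_cons, pvFrameW]
    have h1 : ¬(i = 0) ∧ ¬(j = 0) := by tauto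
    have he1 : i + (j - 1) + 2 = i + j + 1 := by omega
    have he2 : i - 1 + j + 2 = i + j + 1 := by omega
    rw [he1, he2]
    have hp : 3 ^ (i + j + 1) * 3 = 3 ^ (i + j + 2) := by ring
    have h2 : 1 ≤ 3 ^ (i + j + 1) := Nat.one_le_pow _ _ (by norm_num)
    omega
  · simp [pvFrameW]
  · simp [pvFrameW]

def calculate_max_gaps_alt (seq1 : String) (seq2 : String) : Int :=
  let s1 := seq1.toList
  let s2 := seq2.toList
  let vals := pvMachine s1 s2 [.ev s1.length s2.length] [] PySem.Dict.empty
  -- vals[-1]: vals ends as the one-element list holding lcs(len1, len2)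
  (s1.length : Int) + (s2.length : Int) - 2 * vals.getLastD 0

-- ===== PRECONDITION & SPEC =====
def Spec_calculate_max_gaps (seq1 : String) (seq2 : String) (out : Int) : Prop := out = calculate_max_gaps_alt seq1 seq2
instance (seq1 : String) (seq2 : String) (out : Int) : Decidable (Spec_calculate_max_gaps seq1 seq2 out) := by unfold Spec_calculate_max_gaps; infer_instance

-- ===== CLAIM (what is proved, stated in full; the proofs are below) =====
def Claim_equal_calculate_max_gaps : Prop := ∀ (seq1 : String) (seq2 : String), Dom_calculate_max_gaps seq1 seq2 → Spec_calculate_max_gaps seq1 seq2 (calculate_max_gaps seq1 seq2)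

-- ===== LEMMAS AND PROOFS =====

-- the textbook LCS-of-prefixes recursion: both programs compute lcsP n m
def lcsP (s1 s2 : List Char) : Nat → Nat → Int
  | 0, _ => 0
  | _ + 1, 0 => 0
  | i + 1, j + 1 =>
    if s1.getD i 'a' = s2.getD j 'a' then lcsP s1 s2 i j + 1
    else max (lcsP s1 s2 (i + 1) j) (lcsP s1 s2 i (j + 1))
termination_by i j => (i, j)

-- proof-only rolling-row bridge between A's matrix fold and lcsP
def altRowAux : List Char → Char → Int → Int → List Int → List Int
  | [], _, _, _, _ => []
  | _ :: _, _, _, _, [] => []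
  | c :: cs, ch, diag, left, up :: ups =>
    let cur : Int := if c = ch then diag + 1 else max left up
    cur :: altRowAux cs ch up cur ups

def altNextRow (s1 : List Char) (ch : Char) (row : List Int) : List Int :=
  0 :: altRowAux s1 ch 0 0 row.tail

lemma length_altRowAux (cs : List Char) (ch : Char) (d l : Int) (ups : List Int) :
    (altRowAux cs ch d l ups).length = min cs.length ups.length := by
  induction cs generalizing d l ups with
  | nil => simp [altRowAux]
  | cons c cs ih =>
    cases ups with
    | nil => simp [altRowAux]
    | cons u us => simp [altRowAux, ih, Nat.succ_min_succ]

lemma length_altNextRow (s1 : List Char) (ch : Char) (row : List Int)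
    (h : row.length = s1.length + 1) :
    (altNextRow s1 ch row).length = s1.length + 1 := by
  simp [altNextRow, length_altRowAux, h]

lemma getD_last_of_length {l : List Int} {n : Nat} (h : l.length = n + 1) :
    l.getD n 0 = l.getLastD 0 := by
  rw [List.getD_eq_getElem l 0 (by omega), List.getLastD_eq_getLast?, List.getLast?_eq_getElem?]
  simp [h]

lemma pySetD_pySetD (M : List (List Int)) (j : Nat) (r1 r2 : List Int) :
    PySem.List.pySetD (PySem.List.pySetD M (j : Int) r1) (j : Int) r2 = PySem.List.pySetD M (j : Int) r2 := by
  simp [List.set_set]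

lemma pySetD_self (M : List (List Int)) (jn : Nat) (h : jn < M.length) :
    PySem.List.pySetD M (jn : Int) (PySem.List.pyGetD M (jn : Int) []) = M := by
  simp only [PySem.List.pySetD_natCast, PySem.List.pyGetD_natCast]
  rw [List.getD_eq_getElem M [] h, List.set_getElem_self]

lemma pyGetD_pySetD_ne (M : List (List Int)) (a b : Nat) (r : List Int) (h : a ≠ b) :
    PySem.List.pyGetD (PySem.List.pySetD M (b : Int) r) (a : Int) [] = PySem.List.pyGetD M (a : Int) [] := by
  simp [List.getD, List.getElem?_set_ne (by omega : b ≠ a)]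

lemma pyGetD_pySetD_eq (M : List (List Int)) (b : Nat) (r : List Int) (h : b < M.length) :
    PySem.List.pyGetD (PySem.List.pySetD M (b : Int) r) (b : Int) [] = r := by
  simp [List.getD, h]

-- the inner loop writes exactly the row altRowAux computes
lemma inner_loop (s1 s2 : List Char) (n : Nat) (hn : s1.length = n) (jn : Nat) (ch : Char)
    (hch : PySem.List.pyGetD s2 (jn : Int) 'a' = ch) :
    ∀ (cs : List Char) (k : Nat) (M : List (List Int)) (pref prev : List Int),
      s1.drop k = cs →
      PySem.List.pyGetD M (jn : Int) [] = prev →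
      prev.length = n + 1 →
      PySem.List.pyGetD M ((jn : Int) + 1) [] = pref ++ List.replicate (n - k) 0 →
      pref.length = k + 1 →
      jn + 1 < M.length →
      (PySem.List.pyRange ((k : Int) + 1) ((n : Int) + 1) 1).foldl (aBody s1 s2 ((jn : Int) + 1)) M
        = PySem.List.pySetD M ((jn : Int) + 1)
            (pref ++ altRowAux cs ch (PySem.List.pyGetD prev (k : Int) 0) (pref.getLastD 0) (prev.drop (k + 1))) := by
  intro cs
  induction cs with
  | nil =>
    intro k M pref prev hdrop hMj hprevlen hMj1 hpreflen hlen
    have hk : n ≤ k := by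
      have := congrArg List.length hdrop; simp [hn] at this; omega
    rw [PySem.List.pyRange_one_eq_nil (by omega)]
    have hnk : n - k = 0 := by omega
    rw [hnk] at hMj1
    simp only [List.replicate, List.append_nil] at hMj1
    have h1 : ((jn : Int) + 1) = ((jn + 1 : Nat) : Int) := by norm_cast
    rw [h1] at hMj1 ⊢
    simp only [List.foldl_nil, altRowAux, List.append_nil, ← hMj1]
    exact (pySetD_self M (jn + 1) hlen).symm
  | cons c cs' ih =>
    intro k M pref prev hdrop hMj hprevlen hMj1 hpreflen hlen
    have hk : k < n := by
      have := congrArg List.length hdrop; simp [hn] at this; omega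
    have hs1k : PySem.List.pyGetD s1 (k : Int) 'a' = c := by
      have hh : s1[k]? = some c := by
        have := congrArg List.head? hdrop
        simpa [List.head?_drop] using this
      simp [List.getD, hh]
    have h1 : ((jn : Int) + 1) = ((jn + 1 : Nat) : Int) := by norm_cast
    have h2 : ((k : Int) + 1) = ((k + 1 : Nat) : Int) := by norm_cast
    rw [PySem.List.pyRange_one_cons (by omega)]
    simp only [List.foldl_cons]
    have hbody : aBody s1 s2 ((jn : Int) + 1) M ((k : Int) + 1)
        = PySem.List.pySetD M ((jn + 1 : Nat) : Int)
            ((pref ++ [if c = ch then PySem.List.pyGetD prev (k : Int) 0 + 1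
                       else max (pref.getLastD 0) (prev.getD (k + 1) 0)])
              ++ List.replicate (n - (k + 1)) 0) := by
      show (let v : Int :=
              if PySem.List.pyGetD s1 (((k : Int) + 1) - 1) 'a'
                  = PySem.List.pyGetD s2 (((jn : Int) + 1) - 1) 'a' then
                PySem.List.pyGetD (PySem.List.pyGetD M (((jn : Int) + 1) - 1) []) (((k : Int) + 1) - 1) 0 + 1
              else
                max (PySem.List.pyGetD (PySem.List.pyGetD M ((jn : Int) + 1) []) (((k : Int) + 1) - 1) 0)
                    (PySem.List.pyGetD (PySem.List.pyGetD M (((jn : Int) + 1) - 1) []) ((k : Int) + 1) 0)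
            PySem.List.pySetD M ((jn : Int) + 1)
              (PySem.List.pySetD (PySem.List.pyGetD M ((jn : Int) + 1) []) ((k : Int) + 1) v)) = _
      have e1 : ((k : Int) + 1) - 1 = (k : Int) := by ring
      have e2 : ((jn : Int) + 1) - 1 = (jn : Int) := by ring
      rw [e1, e2, hs1k, hch, hMj, hMj1, h1, h2]
      have hleft : (pref ++ List.replicate (n - k) 0).getD k 0 = pref.getLastD 0 := by
        rw [List.getD_append _ _ _ _ (by omega), getD_last_of_length hpreflen]
      have hrep : List.replicate (n - k) (0 : Int) = 0 :: List.replicate (n - (k + 1)) 0 := by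
        have : n - k = (n - (k + 1)) + 1 := by omega
        rw [this, List.replicate_succ]
      simp only [PySem.List.pyGetD_natCast, PySem.List.pySetD_natCast, hleft]
      rw [hrep]
      have hset : (pref ++ 0 :: List.replicate (n - (k + 1)) (0 : Int)).set (k + 1)
            (if c = ch then prev.getD k 0 + 1 else max (pref.getLastD 0) (prev.getD (k + 1) 0))
          = pref ++ (if c = ch then prev.getD k 0 + 1 else max (pref.getLastD 0) (prev.getD (k + 1) 0))
              :: List.replicate (n - (k + 1)) 0 := by
        rw [show k + 1 = pref.length by omega, List.set_append_right _ _ (le_refl pref.length)]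
        simp
      rw [hset]
      simp
    rw [hbody]
    set v : Int := if c = ch then PySem.List.pyGetD prev (k : Int) 0 + 1
                   else max (pref.getLastD 0) (prev.getD (k + 1) 0) with hv
    have hdrop' : s1.drop (k + 1) = cs' := by
      have := congrArg List.tail hdrop
      simpa [List.tail_drop] using this
    have hlen' : jn + 1 < (PySem.List.pySetD M ((jn + 1 : Nat) : Int) ((pref ++ [v]) ++ List.replicate (n - (k + 1)) 0)).length := by
      simpa using hlen
    have hMj' : PySem.List.pyGetD (PySem.List.pySetD M ((jn + 1 : Nat) : Int) ((pref ++ [v]) ++ List.replicate (n - (k + 1)) 0)) (jn : Int) [] = prev := by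
      rw [pyGetD_pySetD_ne _ _ _ _ (by omega)]; exact hMj
    have hMj1' : PySem.List.pyGetD (PySem.List.pySetD M ((jn + 1 : Nat) : Int) ((pref ++ [v]) ++ List.replicate (n - (k + 1)) 0)) ((jn : Int) + 1) [] = (pref ++ [v]) ++ List.replicate (n - (k + 1)) 0 := by
      rw [h1]; exact pyGetD_pySetD_eq _ _ _ hlen
    have ihr := ih (k + 1) (PySem.List.pySetD M ((jn + 1 : Nat) : Int) ((pref ++ [v]) ++ List.replicate (n - (k + 1)) 0))
      (pref ++ [v]) prev hdrop' hMj' hprevlen hMj1' (by simp; omega) hlen'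
    rw [h2, ihr, h1, pySetD_pySetD]
    congr 1
    have hdropk : prev.drop (k + 1) = prev.getD (k + 1) 0 :: prev.drop (k + 2) := by
      rw [List.getD_eq_getElem prev 0 (by omega), List.drop_eq_getElem_cons (by omega)]
    have hdiag : PySem.List.pyGetD prev ((k : Int) + 1) 0 = prev.getD (k + 1) 0 := by
      rw [h2, PySem.List.pyGetD_natCast]
    rw [hdropk]
    simp only [altRowAux, List.append_assoc, List.cons_append, List.nil_append,
      List.getLastD_concat]
    rw [hv]
    simp [List.getD, List.getLastD_eq_getLast?, hdiag]

-- the outer loop: final last row = rolling fold over the remaining characters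
lemma outer_loop (s1 s2 : List Char) (n m : Nat) (hn : s1.length = n) (_hm : s2.length = m) :
    ∀ (t : List Char) (jn : Nat) (M : List (List Int)),
      s2.drop jn = t →
      jn + t.length = m →
      M.length = m + 1 →
      (PySem.List.pyGetD M (jn : Int) []).length = n + 1 →
      (PySem.List.pyGetD M (jn : Int) []).getD 0 0 = 0 →
      (∀ l : Nat, jn < l → l ≤ m → PySem.List.pyGetD M (l : Int) [] = List.replicate (n + 1) 0) →
      PySem.List.pyGetD
        ((PySem.List.pyRange ((jn : Int) + 1) ((m : Int) + 1) 1).foldl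
          (fun M j => (PySem.List.pyRange 1 ((n : Int) + 1) 1).foldl (aBody s1 s2 j) M) M)
        (m : Int) []
        = t.foldl (fun r ch => altNextRow s1 ch r) (PySem.List.pyGetD M (jn : Int) []) := by
  intro t
  induction t with
  | nil =>
    intro jn M hdrop hcount hMlen hrowlen hrow0 hzeros
    have hjm : jn = m := by simpa using hcount
    rw [PySem.List.pyRange_one_eq_nil (a := (jn : Int) + 1) (b := (m : Int) + 1) (by omega)]
    simp [hjm]
  | cons ch t' ih =>
    intro jn M hdrop hcount hMlen hrowlen hrow0 hzeros
    have hjm : jn < m := by simp at hcount; omega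
    have hch : PySem.List.pyGetD s2 (jn : Int) 'a' = ch := by
      have hh : s2[jn]? = some ch := by
        have := congrArg List.head? hdrop
        simpa [List.head?_drop] using this
      simp [List.getD, hh]
    have h1 : ((jn : Int) + 1) = ((jn + 1 : Nat) : Int) := by norm_cast
    rw [PySem.List.pyRange_one_cons (a := (jn : Int) + 1) (b := (m : Int) + 1) (by omega)]
    simp only [List.foldl_cons]
    have hz : PySem.List.pyGetD M ((jn : Int) + 1) [] = [0] ++ List.replicate (n - 0) 0 := by
      rw [h1, hzeros (jn + 1) (by omega) (by omega)]
      simp [List.replicate_succ]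
    have hinner := inner_loop s1 s2 n hn jn ch hch s1 0 M [0] (PySem.List.pyGetD M (jn : Int) [])
      (by simp) rfl hrowlen hz (by simp) (by omega)
    have hstart : ((0 : Nat) : Int) + 1 = (1 : Int) := by norm_num
    rw [hstart] at hinner
    have hroweq : ([0] ++ altRowAux s1 ch (PySem.List.pyGetD (PySem.List.pyGetD M (jn : Int) []) ((0 : Nat) : Int) 0)
          (([0] : List Int).getLastD 0) ((PySem.List.pyGetD M (jn : Int) []).drop (0 + 1)))
        = altNextRow s1 ch (PySem.List.pyGetD M (jn : Int) []) := by
      have : PySem.List.pyGetD (PySem.List.pyGetD M (jn : Int) []) ((0 : Nat) : Int) 0 = 0 := by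
        simpa [PySem.List.pyGetD_zero, List.getD] using hrow0
      rw [this]
      simp [altNextRow, List.drop_one]
    rw [hroweq, h1] at hinner
    rw [h1]
    rw [hinner]
    set r : List Int := altNextRow s1 ch (PySem.List.pyGetD M (jn : Int) []) with hr
    have hlen1 : jn + 1 < M.length := by omega
    have hget : PySem.List.pyGetD (PySem.List.pySetD M ((jn + 1 : Nat) : Int) r) ((jn + 1 : Nat) : Int) []
        = r := pyGetD_pySetD_eq M (jn + 1) r hlen1
    have hih := ih (jn + 1) (PySem.List.pySetD M ((jn + 1 : Nat) : Int) r)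
      (by have := congrArg List.tail hdrop; simpa [List.tail_drop] using this)
      (by simp at hcount ⊢; omega)
      (by simpa using hMlen)
      (by rw [hget, hr, length_altNextRow s1 ch _ (by rw [hrowlen, hn]), hn])
      (by rw [hget, hr]; simp [altNextRow])
      (by
        intro l hl1 hl2
        rw [pyGetD_pySetD_ne M l (jn + 1) r (by omega)]
        exact hzeros l (by omega) hl2)
    rw [hih, hget]

lemma length_foldl_altNextRow (s1 : List Char) :
    ∀ (t : List Char) (row : List Int), row.length = s1.length + 1 →
      (t.foldl (fun r ch => altNextRow s1 ch r) row).length = s1.length + 1 := by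
  intro t
  induction t with
  | nil => intro row h; simpa using h
  | cons ch t' ih =>
    intro row h
    simpa using ih (altNextRow s1 ch row) (length_altNextRow s1 ch row h)

lemma mat0_rows (s1 s2 : List Char) (l : Nat) (hl : l ≤ s2.length) :
    PySem.List.pyGetD
      ((PySem.List.pyRange 0 ((s2.length : Int) + 1) 1).map
        (fun _ => List.replicate ((s1.length : Int) + 1).toNat (0 : Int))) (l : Int) []
      = List.replicate (s1.length + 1) 0 := by
  have hcast : ((s2.length : Int) + 1) = ((s2.length + 1 : Nat) : Int) := by norm_cast
  have htn : ((s1.length : Int) + 1).toNat = s1.length + 1 := by omega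
  rw [hcast, htn,
    PySem.List.pyGetD_map_pyRange (fun _ => List.replicate (s1.length + 1) (0 : Int))
      (s2.length + 1) l [] (by omega)]

lemma matrix_final (s1 s2 : List Char) :
    PySem.List.pyGetD
      (PySem.List.pyGetD
        ((PySem.List.pyRange 1 ((s2.length : Int) + 1) 1).foldl
          (fun M j => (PySem.List.pyRange 1 ((s1.length : Int) + 1) 1).foldl (aBody s1 s2 j) M)
          ((PySem.List.pyRange 0 ((s2.length : Int) + 1) 1).map
            (fun _ => List.replicate ((s1.length : Int) + 1).toNat (0 : Int))))
        ((s2.length : Int)) []) ((s1.length : Int)) 0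
      = (s2.foldl (fun r ch => altNextRow s1 ch r) (List.replicate (s1.length + 1) 0)).getLastD 0 := by
  have hrow0 := mat0_rows s1 s2 0 (by omega)
  have houter := outer_loop s1 s2 s1.length s2.length rfl rfl s2 0
    ((PySem.List.pyRange 0 ((s2.length : Int) + 1) 1).map
      (fun _ => List.replicate ((s1.length : Int) + 1).toNat (0 : Int)))
    (by simp)
    (by simp)
    (by simp [PySem.List.length_pyRange_one])
    (by rw [hrow0]; simp)
    (by rw [hrow0]; simp)
    (by intro l _ hl2; exact mat0_rows s1 s2 l hl2)
  have e : ((0 : Nat) : Int) + 1 = (1 : Int) := by norm_num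
  rw [e, hrow0] at houter
  rw [houter, PySem.List.pyGetD_natCast,
    getD_last_of_length (length_foldl_altNextRow s1 s2 _ (by simp))]

-- ===== rolling row = lcsP =====

lemma lcsP_left_zero (s1 s2 : List Char) (j : Nat) : lcsP s1 s2 0 j = 0 := by
  unfold lcsP; rfl

lemma lcsP_right_zero (s1 s2 : List Char) (i : Nat) : lcsP s1 s2 i 0 = 0 := by
  cases i <;> (unfold lcsP; rfl)

def rowOf (s1 s2 : List Char) (j : Nat) : List Int :=
  (List.range (s1.length + 1)).map (fun i => lcsP s1 s2 i j)

lemma altRowAux_lcsP (s1 s2 : List Char) (j : Nat) :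
    ∀ (cs : List Char) (k : Nat), s1.drop k = cs →
      altRowAux cs (s2.getD j 'a') (lcsP s1 s2 k j) (lcsP s1 s2 k (j + 1))
          ((List.range' (k + 1) (s1.length - k)).map (fun i => lcsP s1 s2 i j))
        = (List.range' (k + 1) (s1.length - k)).map (fun i => lcsP s1 s2 i (j + 1)) := by
  intro cs
  induction cs with
  | nil =>
    intro k hdrop
    have hk : s1.length ≤ k := by
      have := congrArg List.length hdrop; simp at this; omega
    have : s1.length - k = 0 := by omega
    simp [this, altRowAux]
  | cons c cs' ih =>
    intro k hdrop
    have hk : k < s1.length := by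
      have := congrArg List.length hdrop; simp at this; omega
    have hc : s1.getD k 'a' = c := by
      have hh : s1[k]? = some c := by
        have := congrArg List.head? hdrop
        simpa [List.head?_drop] using this
      simp [List.getD, hh]
    have hrng : s1.length - k = (s1.length - (k + 1)) + 1 := by omega
    rw [hrng, List.range'_succ]
    simp only [List.map_cons, altRowAux]
    have hcur : (if c = s2.getD j 'a' then lcsP s1 s2 k j + 1
        else max (lcsP s1 s2 k (j + 1)) (lcsP s1 s2 (k + 1) j)) = lcsP s1 s2 (k + 1) (j + 1) := by
      show _ = lcsP s1 s2 (k + 1) (j + 1)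
      rw [lcsP]
      rw [hc]
      by_cases h : c = s2.getD j 'a'
      · simp [h]
      · simp [max_comm]
    rw [hcur]
    have hdrop' : s1.drop (k + 1) = cs' := by
      have := congrArg List.tail hdrop
      simpa [List.tail_drop] using this
    have := ih (k + 1) hdrop'
    rw [this]

lemma altNextRow_rowOf (s1 s2 : List Char) (j : Nat) :
    altNextRow s1 (s2.getD j 'a') (rowOf s1 s2 j) = rowOf s1 s2 (j + 1) := by
  have hrow : ∀ j' : Nat, rowOf s1 s2 j' = 0 :: (List.range' 1 s1.length).map (fun i => lcsP s1 s2 i j') := by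
    intro j'
    unfold rowOf
    rw [List.range_eq_range', List.range'_succ]
    simp [lcsP_left_zero]
  rw [hrow j, hrow (j + 1)]
  unfold altNextRow
  have h0 := altRowAux_lcsP s1 s2 j s1 0 rfl
  rw [lcsP_left_zero, lcsP_left_zero] at h0
  have h0' : altRowAux s1 (s2.getD j 'a') 0 0
        ((List.range' 1 s1.length).map (fun i => lcsP s1 s2 i j))
      = (List.range' 1 s1.length).map (fun i => lcsP s1 s2 i (j + 1)) := by
    simpa using h0
  simp only [List.tail_cons, h0']

lemma foldl_altNextRow_lcsP (s1 s2 : List Char) :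
    ∀ (t : List Char) (j : Nat), s2.drop j = t → j ≤ s2.length →
      t.foldl (fun r ch => altNextRow s1 ch r) (rowOf s1 s2 j) = rowOf s1 s2 s2.length := by
  intro t
  induction t with
  | nil =>
    intro j hdrop hle
    have hge : s2.length ≤ j := by
      have := congrArg List.length hdrop; simp at this; omega
    have hj : j = s2.length := by omega
    simp [hj]
  | cons ch t' ih =>
    intro j hdrop hle
    have hj : j < s2.length := by
      have := congrArg List.length hdrop; simp at this; omega
    have hc : s2.getD j 'a' = ch := by
      have hh : s2[j]? = some ch := by
        have := congrArg List.head? hdrop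
        simpa [List.head?_drop] using this
      simp [List.getD, hh]
    simp only [List.foldl_cons]
    rw [← hc, altNextRow_rowOf]
    exact ih (j + 1) (by have := congrArg List.tail hdrop; simpa [List.tail_drop] using this) (by omega)

lemma rowOf_zero (s1 s2 : List Char) : rowOf s1 s2 0 = List.replicate (s1.length + 1) 0 := by
  unfold rowOf
  rw [List.eq_replicate_iff]
  constructor
  · simp
  · intro b hb
    simp only [List.mem_map] at hb
    obtain ⟨i, _, hi⟩ := hb
    rw [← hi, lcsP_right_zero]

lemma rolling_eq_lcsP (s1 s2 : List Char) :
    (s2.foldl (fun r ch => altNextRow s1 ch r) (List.replicate (s1.length + 1) 0)).getLastD 0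
      = lcsP s1 s2 s1.length s2.length := by
  rw [← rowOf_zero, foldl_altNextRow_lcsP s1 s2 s2 0 (by simp) (by omega)]
  rw [← getD_last_of_length (l := rowOf s1 s2 s2.length) (n := s1.length) (by simp [rowOf])]
  unfold rowOf
  rw [List.getD_eq_getElem _ 0 (by simp)]
  simp

-- ===== machine = lcsP =====

def MemoInv (s1 s2 : List Char) (memo : PySem.Dict (Nat × Nat) Int) : Prop :=
  ∀ p v, memo.get? p = some v → v = lcsP s1 s2 p.1 p.2

lemma memoInv_insert (s1 s2 : List Char) (memo : PySem.Dict (Nat × Nat) Int)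
    (h : MemoInv s1 s2 memo) (i j : Nat) (v : Int) (hv : v = lcsP s1 s2 i j) :
    MemoInv s1 s2 (memo.insert (i, j) v) := by
  intro p w hw
  rw [PySem.Dict.get?_insert] at hw
  by_cases hp : p = (i, j)
  · rw [if_pos hp] at hw
    cases hw; rw [hp]; exact hv
  · rw [if_neg hp] at hw
    exact h p w hw

lemma machine_eval (s1 s2 : List Char) :
    ∀ (N i j : Nat), i + j ≤ N →
    ∀ (rest : List PvFrame) (vals : List Int) (memo : PySem.Dict (Nat × Nat) Int),
      MemoInv s1 s2 memo →
      ∃ memo', MemoInv s1 s2 memo' ∧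
        pvMachine s1 s2 (.ev i j :: rest) vals memo
          = pvMachine s1 s2 rest (vals ++ [lcsP s1 s2 i j]) memo' := by
  intro N
  induction N with
  | zero =>
    intro i j hij rest vals memo hinv
    have hi : i = 0 := by omega
    refine ⟨memo, hinv, ?_⟩
    rw [pvMachine]
    cases hm : memo.get? (i, j) with
    | some v =>
      have := hinv (i, j) v hm
      simp [this]
    | none => simp [hi, lcsP_left_zero]
  | succ N ihN =>
    intro i j hij rest vals memo hinv
    rw [pvMachine]
    cases hm : memo.get? (i, j) with
    | some v =>
      have := hinv (i, j) v hm
      exact ⟨memo, hinv, by simp [this]⟩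
    | none =>
      by_cases hz : i = 0 ∨ j = 0
      · refine ⟨memo, hinv, ?_⟩
        rw [if_pos hz]
        rcases hz with h | h <;> simp [h, lcsP_left_zero, lcsP_right_zero]
      · rw [if_neg hz]
        have hi0 : i ≠ 0 := fun h => hz (Or.inl h)
        have hj0 : j ≠ 0 := fun h => hz (Or.inr h)
        obtain ⟨i', rfl⟩ : ∃ i', i = i' + 1 := ⟨i - 1, by omega⟩
        obtain ⟨j', rfl⟩ : ∃ j', j = j' + 1 := ⟨j - 1, by omega⟩
        simp only [Nat.add_sub_cancel]
        by_cases hc : s1.getD i' 'a' = s2.getD j' 'a'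
        · rw [if_pos hc]
          obtain ⟨memo1, hinv1, heq1⟩ :=
            ihN i' j' (by omega) (.add1 (i' + 1) (j' + 1) :: rest) vals memo hinv
          rw [heq1, pvMachine]
          have hval : lcsP s1 s2 (i' + 1) (j' + 1) = lcsP s1 s2 i' j' + 1 := by
            rw [lcsP, if_pos hc]
          refine ⟨memo1.insert (i' + 1, j' + 1) (lcsP s1 s2 i' j' + 1),
            memoInv_insert s1 s2 memo1 hinv1 _ _ _ hval.symm, ?_⟩
          simp [hval]
        · rw [if_neg hc]
          obtain ⟨memo1, hinv1, heq1⟩ :=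
            ihN (i' + 1) j' (by omega) (.ev i' (j' + 1) :: .mx (i' + 1) (j' + 1) :: rest) vals memo hinv
          rw [heq1]
          obtain ⟨memo2, hinv2, heq2⟩ :=
            ihN i' (j' + 1) (by omega) (.mx (i' + 1) (j' + 1) :: rest)
              (vals ++ [lcsP s1 s2 (i' + 1) j']) memo1 hinv1
          rw [heq2, pvMachine]
          have hval : lcsP s1 s2 (i' + 1) (j' + 1)
              = max (lcsP s1 s2 (i' + 1) j') (lcsP s1 s2 i' (j' + 1)) := by
            rw [lcsP, if_neg hc]
          set a := lcsP s1 s2 i' (j' + 1)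
          set b := lcsP s1 s2 (i' + 1) j'
          have hmax : (if a > b then a else b) = max b a := by
            by_cases h : a > b
            · rw [if_pos h, max_eq_right (le_of_lt h)]
            · rw [if_neg h, max_eq_left (by omega)]
          refine ⟨memo2.insert (i' + 1, j' + 1) (if a > b then a else b),
            memoInv_insert s1 s2 memo2 hinv2 _ _ _ (by rw [hmax, hval]), ?_⟩
          simp only [List.getLastD_concat, List.dropLast_concat]
          rw [hmax, ← hval]

lemma machine_top (s1 s2 : List Char) :
    pvMachine s1 s2 [.ev s1.length s2.length] [] PySem.Dict.empty
      = [lcsP s1 s2 s1.length s2.length] := by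
  obtain ⟨memo', _, heq⟩ := machine_eval s1 s2 (s1.length + s2.length) s1.length s2.length
    (le_refl _) [] [] PySem.Dict.empty
    (by intro p v hv; rw [PySem.Dict.get?_empty] at hv; cases hv)
  rw [heq, pvMachine]
  simp

-- ===== VERDICT (by name: the statement is the Claim_ definition above) =====
theorem calculate_max_gaps_spec : Claim_equal_calculate_max_gaps := by
  intro seq1 seq2 _
  show calculate_max_gaps seq1 seq2 = calculate_max_gaps_alt seq1 seq2
  simp only [calculate_max_gaps, calculate_max_gaps_alt]
  rw [matrix_final seq1.toList seq2.toList, rolling_eq_lcsP, machine_top]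
  simp
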